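-- pv_equiv track=rewrite | github.com/Lucas-Boom/CS-2 | CS2 What's in a name.py | return_middlename
-- ===== SOURCE A (Python) =====
-- def return_middlename(name):                               #defines function to return first name
--     '''
--     Takes a string and deletes the first and last name then returns the middle
--     Args:
--         name(string): User's inputed name
--     Returns:
--         return middle(string): seperated middle name from full name
--     '''
--     space = 0                                              #defines space as 0
--     for char in name:                                      #for each character in name
--         if char == " ":                                    #if character is a space
--             space +=1                                      #add one to space
--     if space <= 1:                                         #if space  is less than 1
--         middle = "No middle name"                          #tell user they have no middle name
--     else:                                                  #else
--         beg = 0                                            #set variable beg to 0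
--         end = len(name)-1                                  #set variable of end to length of name and to work backwards to beginning
--         for i in range(0, len(name)):                      #for element in the range of 0 to the length of name
--             if name[i] == ' ':                             #if name of element is a space
--                 beg +=1                                    #then add 1 to beg
--                 break                                      #break
--             else:                                          #else
--                 beg = beg+1                                #add one to beg
--
--
--         for i in range(len(name)-1,-1,-1):                 #for element in range of length of name working in reverse order
--             if name[i] == ' ':                             #checks if name has a space
--                 break                                      #break
--             else:                                          #or else
--                 end = end-1                                #subtract 1 from variable end
--         middle = name[beg:end]                             #define middle, the variable, as name from beginning to end
--         return middle                                      #return middle name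
-- ===== SOURCE B (Python) =====
-- def return_middlename(name):
--     """Tokenize on single spaces and rejoin the middle tokens.
--
--     Returns None (as A does, implicitly) when there are fewer than two
--     spaces; otherwise returns everything strictly between the first and
--     the last space.
--     """
--     parts = name.split(' ')
--     if len(parts) <= 2:
--         return None
--     return ' '.join(parts[1:-1])
-- ===== Notes on version B (the rewrite author's own statement) =====
-- stated objective: simpler
-- what changed: Replaces A's three manual character scans (count spaces, forward scan for the first space, backward scan for the last space, then slice) with a single split on the space character followed by rejoining the middle tokens.
import Mathlib
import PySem

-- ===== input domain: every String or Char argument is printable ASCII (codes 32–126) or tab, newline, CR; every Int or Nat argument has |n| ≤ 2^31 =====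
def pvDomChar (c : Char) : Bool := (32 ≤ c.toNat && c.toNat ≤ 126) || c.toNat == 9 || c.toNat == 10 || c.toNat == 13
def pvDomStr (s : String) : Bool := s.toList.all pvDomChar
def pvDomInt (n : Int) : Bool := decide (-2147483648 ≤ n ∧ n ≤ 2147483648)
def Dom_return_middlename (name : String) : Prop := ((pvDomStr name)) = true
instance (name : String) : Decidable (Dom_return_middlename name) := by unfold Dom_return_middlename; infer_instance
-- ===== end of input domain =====

-- B replaces A's three manual character scans by one split(' ') plus a rejoin of the
-- middle tokens (objective: simpler).  A falls off the end of the function when the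
-- name has at most one space, so it returns None there (never "No middle name").

-- ===== PORT A =====
-- first loop: 'for i in range(0, len(name)): if name[i]==" ": beg+=1; break else beg+=1'
-- (iterating the characters in index order; beg is the running counter)
def pvABeg : List Char → Int → Int
  | [], b => b
  | ch :: rest, b => if ch == ' ' then b + 1 else pvABeg rest (b + 1)

-- second loop: 'for i in range(len(name)-1,-1,-1): if name[i]==" ": break else end-=1'
-- (iterating the characters in reverse index order; e is the running counter)
def pvAEnd : List Char → Int → Int
  | [], e => e
  | ch :: rest, e => if ch == ' ' then e else pvAEnd rest (e - 1)

def return_middlename (name : String) : Option String :=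
  let cs := name.toList
  let space : Int := cs.foldl (fun s ch => if ch == ' ' then s + 1 else s) 0
  if space ≤ 1 then
    none                                  -- 'middle = "No middle name"' is assigned but never returned
  else
    let beg : Int := pvABeg cs 0
    let e : Int := pvAEnd cs.reverse ((cs.length : Int) - 1)
    some (String.ofList (PySem.List.slice cs (some beg) (some e)))

-- ===== PORT B =====
def return_middlename_alt (name : String) : Option String :=
  let parts := PySem.Chars.splitOn name.toList [' ']
  if parts.length ≤ 2 then none
  else some (String.ofList (PySem.Chars.join [' '] (PySem.List.slice parts (some 1) (some (-1)))))

-- ===== PRECONDITION & SPEC =====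
def Spec_return_middlename (name : String) (out : Option String) : Prop := out = return_middlename_alt name
instance (name : String) (out : Option String) : Decidable (Spec_return_middlename name out) := by unfold Spec_return_middlename; infer_instance

-- ===== CLAIM (what is proved, stated in full; the proofs are below) =====
def Claim_equal_return_middlename : Prop := ∀ (name : String), Dom_return_middlename name → Spec_return_middlename name (return_middlename name)

-- ===== LEMMAS AND PROOFS =====

-- Shape of splitOn's fuelled worker for a one-character separator: for every fuel and
-- input there are pieces h :: r such that the accumulators thread through as shown.
lemma pvGo_shape (c : Char) : ∀ (fuel : Nat) (l : List Char), ∃ h r, ∀ (cur : List Char) (acc : List (List Char)),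
    PySem.Chars.splitOn.go [c] fuel l cur acc = acc.reverse ++ (cur.reverse ++ h) :: r := by
  intro fuel
  induction fuel with
  | zero =>
    intro l
    exact ⟨l, [], fun cur acc => by simp [PySem.Chars.splitOn.go]⟩
  | succ n ih =>
    intro l
    match l with
    | [] => exact ⟨[], [], fun cur acc => by simp [PySem.Chars.splitOn.go]⟩
    | x :: rest =>
      by_cases hx : x = c
      · obtain ⟨h, r, hh⟩ := ih rest
        refine ⟨[], h :: r, fun cur acc => ?_⟩
        subst hx
        rw [show PySem.Chars.splitOn.go [x] (n+1) (x::rest) cur acc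
              = PySem.Chars.splitOn.go [x] n rest [] (cur.reverse :: acc) from by
            simp [PySem.Chars.splitOn.go]]
        rw [hh]; simp
      · obtain ⟨h, r, hh⟩ := ih rest
        refine ⟨x :: h, r, fun cur acc => ?_⟩
        rw [show PySem.Chars.splitOn.go [c] (n+1) (x::rest) cur acc
              = PySem.Chars.splitOn.go [c] n rest (x :: cur) acc from by
            simp [PySem.Chars.splitOn.go, List.isPrefixOf, Ne.symm hx]]
        rw [hh]; simp

lemma pvSplit_def (l : List Char) (c : Char) :
    PySem.Chars.splitOn l [c] = PySem.Chars.splitOn.go [c] (l.length + 1) l [] [] := rfl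

lemma pvSplit_nil (c : Char) : PySem.Chars.splitOn [] [c] = [[]] := rfl

lemma pvSplit_cons_sep (c : Char) (t : List Char) :
    PySem.Chars.splitOn (c :: t) [c] = [] :: PySem.Chars.splitOn t [c] := by
  obtain ⟨h, r, hh⟩ := pvGo_shape c (t.length + 1) t
  have e1 : PySem.Chars.splitOn (c :: t) [c]
      = PySem.Chars.splitOn.go [c] (t.length + 1) t [] [[]] := by
    rw [pvSplit_def]
    simp [PySem.Chars.splitOn.go]
  rw [e1, hh, pvSplit_def, hh]; simp

lemma pvSplit_cons_ne (x c : Char) (t : List Char) (hx : x ≠ c) :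
    ∃ h r, PySem.Chars.splitOn t [c] = h :: r ∧
      PySem.Chars.splitOn (x :: t) [c] = (x :: h) :: r := by
  obtain ⟨h, r, hh⟩ := pvGo_shape c (t.length + 1) t
  refine ⟨h, r, by rw [pvSplit_def, hh]; simp, ?_⟩
  have e1 : PySem.Chars.splitOn (x :: t) [c]
      = PySem.Chars.splitOn.go [c] (t.length + 1) t [x] [] := by
    rw [pvSplit_def]
    simp [PySem.Chars.splitOn.go, List.isPrefixOf, Ne.symm hx]
  rw [e1, hh]; simp

lemma pvSplit_no_sep (c : Char) : ∀ (l : List Char), c ∉ l → PySem.Chars.splitOn l [c] = [l] := by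
  intro l
  induction l with
  | nil => intro _; exact pvSplit_nil c
  | cons x t ih =>
    intro hmem
    have hx : x ≠ c := fun h => hmem (h ▸ List.mem_cons_self)
    obtain ⟨h, r, ht, hcons⟩ := pvSplit_cons_ne x c t hx
    have := ih (fun h => hmem (List.mem_cons_of_mem _ h))
    rw [this] at ht
    cases ht
    rw [hcons]

lemma pvSplit_length (c : Char) : ∀ (l : List Char),
    (PySem.Chars.splitOn l [c]).length = l.count c + 1 := by
  intro l
  induction l with
  | nil => simp [pvSplit_nil]
  | cons x t ih =>
    by_cases hx : x = c
    · subst hx; simp [pvSplit_cons_sep, ih]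
    · obtain ⟨h, r, ht, hcons⟩ := pvSplit_cons_ne x c t hx
      rw [hcons, List.count_cons]
      rw [ht] at ih
      simp [hx] at ih ⊢
      omega

lemma pvJoin_cons_cons (c : Char) (a b : List Char) (r : List (List Char)) :
    PySem.Chars.join [c] (a :: b :: r) = a ++ c :: PySem.Chars.join [c] (b :: r) := by
  simp [PySem.Chars.join, List.intercalate, List.intersperse]

lemma pvJoin_split (c : Char) : ∀ (l : List Char),
    PySem.Chars.join [c] (PySem.Chars.splitOn l [c]) = l := by
  intro l
  induction l with
  | nil => simp [pvSplit_nil, PySem.Chars.join, List.intercalate]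
  | cons x t ih =>
    by_cases hx : x = c
    · subst hx
      rw [pvSplit_cons_sep]
      obtain ⟨h, r, ht⟩ : ∃ h r, PySem.Chars.splitOn t [x] = h :: r := by
        obtain ⟨h, r, hh⟩ := pvGo_shape x (t.length + 1) t
        exact ⟨h, r, by rw [pvSplit_def, hh]; simp⟩
      rw [ht] at ih ⊢
      rw [pvJoin_cons_cons, ih]
      simp
    · obtain ⟨h, r, ht, hcons⟩ := pvSplit_cons_ne x c t hx
      rw [hcons]
      rw [ht] at ih
      cases r with
      | nil =>
        simp [PySem.Chars.join, List.intercalate] at ih ⊢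
        rw [ih]
      | cons b r' =>
        rw [pvJoin_cons_cons] at ih ⊢
        simp only [List.cons_append, ih]

lemma pvSplit_first (c : Char) (t : List Char) : ∀ (p : List Char), c ∉ p →
    PySem.Chars.splitOn (p ++ c :: t) [c] = p :: PySem.Chars.splitOn t [c] := by
  intro p
  induction p with
  | nil => intro _; simpa using pvSplit_cons_sep c t
  | cons x p' ih =>
    intro hmem
    have hx : x ≠ c := fun h => hmem (h ▸ List.mem_cons_self)
    obtain ⟨h, r, ht, hcons⟩ := pvSplit_cons_ne x c (p' ++ c :: t) hx
    have hrec := ih (fun h => hmem (List.mem_cons_of_mem _ h))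
    rw [hrec] at ht
    cases ht
    simpa using hcons

lemma pvSplit_last (c : Char) (q : List Char) (hq : c ∉ q) : ∀ (m : List Char),
    PySem.Chars.splitOn (m ++ c :: q) [c] = PySem.Chars.splitOn m [c] ++ [q] := by
  intro m
  induction m with
  | nil => simp [pvSplit_cons_sep, pvSplit_no_sep c q hq, pvSplit_nil]
  | cons x m' ih =>
    by_cases hx : x = c
    · subst hx
      rw [List.cons_append, pvSplit_cons_sep, pvSplit_cons_sep, ih]
      simp
    · obtain ⟨h, r, ht, hcons⟩ := pvSplit_cons_ne x c (m' ++ c :: q) hx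
      rw [ih] at ht
      obtain ⟨h', r', ht', hcons'⟩ := pvSplit_cons_ne x c m' hx
      rw [ht'] at ht
      rw [List.cons_append, hcons, hcons']
      cases ht
      simp

lemma pvFirst (c : Char) : ∀ (l : List Char), c ∈ l → ∃ p t, l = p ++ c :: t ∧ c ∉ p := by
  intro l
  induction l with
  | nil => intro h; cases h
  | cons x t ih =>
    intro hmem
    by_cases hx : x = c
    · exact ⟨[], t, by simp [hx], by simp⟩
    · have : c ∈ t := by
        cases List.mem_cons.mp hmem with
        | inl h => exact absurd h.symm hx
        | inr h => exact h
      obtain ⟨p, t', heq, hp⟩ := ih this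
      exact ⟨x :: p, t', by simp [heq], by
        intro hc
        cases List.mem_cons.mp hc with
        | inl h => exact hx h.symm
        | inr h => exact hp h⟩

lemma pvABeg_spec (t : List Char) : ∀ (p : List Char) (b : Int), ' ' ∉ p →
    pvABeg (p ++ ' ' :: t) b = b + p.length + 1 := by
  intro p
  induction p with
  | nil => intro b _; simp [pvABeg]
  | cons x p' ih =>
    intro b hmem
    have hx : x ≠ ' ' := fun h => hmem (h ▸ List.mem_cons_self)
    rw [List.cons_append]
    rw [show pvABeg (x :: (p' ++ ' ' :: t)) b = pvABeg (p' ++ ' ' :: t) (b + 1) from by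
      simp [pvABeg, hx]]
    rw [ih (b + 1) (fun h => hmem (List.mem_cons_of_mem _ h))]
    simp only [List.length_cons]; push_cast; ring

lemma pvAEnd_spec (t : List Char) : ∀ (q : List Char) (e : Int), ' ' ∉ q →
    pvAEnd (q ++ ' ' :: t) e = e - q.length := by
  intro q
  induction q with
  | nil => intro e _; simp [pvAEnd]
  | cons x q' ih =>
    intro e hmem
    have hx : x ≠ ' ' := fun h => hmem (h ▸ List.mem_cons_self)
    rw [List.cons_append]
    rw [show pvAEnd (x :: (q' ++ ' ' :: t)) e = pvAEnd (q' ++ ' ' :: t) (e - 1) from by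
      simp [pvAEnd, hx]]
    rw [ih (e - 1) (fun h => hmem (List.mem_cons_of_mem _ h))]
    simp only [List.length_cons]; push_cast; ring

-- ===== VERDICT (by name: the statement is the Claim_ definition above) =====
theorem return_middlename_spec : Claim_equal_return_middlename := by
  intro name _
  unfold Spec_return_middlename return_middlename return_middlename_alt
  set cs := name.toList with hcsdef
  have hcount : cs.foldl (fun s ch => if ch == ' ' then s + 1 else s) 0
      = (0 : Int) + cs.count ' ' := PySem.List.foldl_count_if (· == ' ') cs 0
  have hlen := pvSplit_length ' ' cs
  by_cases hle : cs.count ' ' ≤ 1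
  · -- at most one space: both sides are none
    simp only [hcount]
    rw [if_pos (by omega), if_pos (by omega)]
  · -- at least two spaces
    rw [not_le] at hle
    have hmem : ' ' ∈ cs := List.count_pos_iff.mp (by omega)
    obtain ⟨p, t, hcs, hp⟩ := pvFirst ' ' cs hmem
    have hpcount : p.count ' ' = 0 := List.count_eq_zero.mpr hp
    have htcount : 1 ≤ t.count ' ' := by
      have : cs.count ' ' = p.count ' ' + (1 + t.count ' ') := by
        rw [hcs]; simp [List.count_append]; omega
      omega
    have htm : ' ' ∈ t.reverse := by
      rw [List.mem_reverse]; exact List.count_pos_iff.mp (by omega)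
    obtain ⟨q', r', htrev, hq'⟩ := pvFirst ' ' t.reverse htm
    have ht : t = r'.reverse ++ ' ' :: q'.reverse := by
      have := congrArg List.reverse htrev
      simpa using this
    set m := r'.reverse with hmdef
    set q := q'.reverse with hqdef
    have hq : ' ' ∉ q := by rw [hqdef, List.mem_reverse]; exact hq'
    have hcs2 : cs = p ++ ' ' :: (m ++ ' ' :: q) := by rw [hcs, ht]
    -- A's side: beg, e, slice
    have hbeg : pvABeg cs 0 = ((p.length + 1 : Nat) : Int) := by
      rw [hcs2, pvABeg_spec _ p 0 hp]; push_cast; ring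
    have hlencs : cs.length = p.length + m.length + q.length + 2 := by
      rw [hcs2]; simp; omega
    have hrev : cs.reverse = q.reverse ++ ' ' :: (m.reverse ++ ' ' :: p.reverse) := by
      rw [hcs2]; simp
    have hqrev : ' ' ∉ q.reverse := by rw [List.mem_reverse]; exact hq
    have hend : pvAEnd cs.reverse ((cs.length : Int) - 1)
        = ((p.length + 1 + m.length : Nat) : Int) := by
      rw [hrev, pvAEnd_spec _ q.reverse _ hqrev]
      rw [hlencs]; simp only [List.length_reverse]; push_cast; ring
    have hslice : PySem.List.slice cs (some (pvABeg cs 0))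
        (some (pvAEnd cs.reverse ((cs.length : Int) - 1))) = m := by
      rw [hbeg, hend, PySem.List.slice_natCast]
      have h1 : p.length + 1 + m.length - (p.length + 1) = m.length := by omega
      rw [h1]
      have h2 : cs = (p ++ [' ']) ++ (m ++ ' ' :: q) := by rw [hcs2]; simp
      rw [h2]
      rw [List.drop_left' (by simp)]
      rw [show m ++ ' ' :: q = m ++ (' ' :: q) from rfl, List.take_left' rfl]
    -- B's side: parts and the middle join
    have hparts : PySem.Chars.splitOn cs [' ']
        = p :: (PySem.Chars.splitOn m [' '] ++ [q]) := by
      rw [hcs2, pvSplit_first ' ' _ p hp, pvSplit_last ' ' q hq m]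
    have hplen : (PySem.Chars.splitOn cs [' ']).length
        = (PySem.Chars.splitOn m [' ']).length + 2 := by
      rw [hparts]; simp
    have hmlen : 1 ≤ (PySem.Chars.splitOn m [' ']).length := by
      rw [pvSplit_length]; omega
    have hbslice : PySem.List.slice (PySem.Chars.splitOn cs [' ']) (some 1) (some (-1))
        = PySem.Chars.splitOn m [' '] := by
      rw [hparts]
      simp [PySem.List.slice, PySem.List.clampIdx]
      rw [if_neg (by omega)]
      rw [show (PySem.Chars.splitOn m [' ']).length + 1 - 1
            = (PySem.Chars.splitOn m [' ']).length from by omega]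
      exact List.take_left' rfl
    -- put both sides together
    simp only [hcount]
    rw [if_neg (by omega), if_neg (by omega)]
    rw [hslice, hbslice, pvJoin_split]
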